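-- pv_equiv track=rewrite | github.com/ridiculouz/TaG | src/evaluation.py | get_span_mapping
-- ===== SOURCE A (Python) =====
-- def get_span_mapping(pred: list, gold: list):
--     """
--     Input in sample format. Get the mapping dict from pred to gold.
--     Span format: (start, end)
--     """
--     span_mapping = {}
--     tp = 0
--     for i_p, ps in enumerate(pred):
--         for i_g, gs in enumerate(gold):
--             if ps == gs:
--                 span_mapping[i_p] = i_g
--                 tp += 1
--                 break
--         if i_p not in span_mapping:
--             span_mapping[i_p] = -1
--     return tp, span_mapping
-- ===== SOURCE B (Python) =====
-- def get_span_mapping(pred: list, gold: list):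
--     """Gold-driven inverted index: bucket pred indices by span once, then a single
--     pass over gold pops each span's bucket at its first occurrence and stamps that
--     gold index into a preallocated result array."""
--     buckets = {}
--     for i, ps in enumerate(pred):
--         buckets.setdefault(ps, []).append(i)
--     mapped = [-1] * len(pred)
--     for j, gs in enumerate(gold):
--         for i in buckets.pop(gs, ()):
--             mapped[i] = j
--     tp = sum(v != -1 for v in mapped)
--     return tp, dict(enumerate(mapped))
-- ===== Notes on version B (the rewrite author's own statement) =====
-- stated objective: faster
-- what changed: Inverted the traversal: instead of scanning gold for every pred span, B buckets pred indices by span once, then a single gold-driven pass pops each bucket at the span's first gold occurrence and stamps that index into a preallocated array.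
import Mathlib
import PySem

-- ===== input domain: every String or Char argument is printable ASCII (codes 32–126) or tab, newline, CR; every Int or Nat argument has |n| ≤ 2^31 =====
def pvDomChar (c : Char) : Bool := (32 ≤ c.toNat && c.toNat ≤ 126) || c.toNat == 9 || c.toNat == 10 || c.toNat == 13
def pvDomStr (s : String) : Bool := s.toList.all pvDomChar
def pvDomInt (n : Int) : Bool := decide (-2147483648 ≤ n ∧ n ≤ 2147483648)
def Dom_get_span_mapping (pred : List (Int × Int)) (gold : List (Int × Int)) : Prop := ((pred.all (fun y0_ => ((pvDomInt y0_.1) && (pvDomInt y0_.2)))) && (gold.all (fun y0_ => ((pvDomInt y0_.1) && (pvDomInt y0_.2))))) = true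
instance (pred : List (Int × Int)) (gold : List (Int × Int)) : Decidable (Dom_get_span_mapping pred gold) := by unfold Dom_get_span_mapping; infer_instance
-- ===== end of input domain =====

-- B inverts the traversal: pred indices are bucketed by span once, then one gold-driven pass pops each
-- bucket at its span's first gold occurrence and stamps that index into a preallocated array (objective: faster).

-- ===== PORT A =====
-- inner 'for i_g, gs in enumerate(gold): if ps == gs: … break' — first matching gold index, or none
def pvFindIdx (ps : Int × Int) : List (Int × Int) → Int → Option Int
  | [], _ => none
  | g :: rest, i => if ps = g then some i else pvFindIdx ps rest (i + 1)

-- outer 'for i_p, ps in enumerate(pred)' loop, state (tp, span_mapping)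
def pvALoop (gold : List (Int × Int)) : List (Int × Int) → Int → Int × PySem.Dict Int Int → Int × PySem.Dict Int Int
  | [], _, st => st
  | ps :: rest, i, (tp, d) =>
      let st' : Int × PySem.Dict Int Int :=
        match pvFindIdx ps gold 0 with
        | some j => (tp + 1, d.insert i j)
        | none => (tp, d)
      -- 'if i_p not in span_mapping: span_mapping[i_p] = -1'
      let d'' := if st'.2.contains i then st'.2 else st'.2.insert i (-1)
      pvALoop gold rest (i + 1) (st'.1, d'')

def get_span_mapping (pred : List (Int × Int)) (gold : List (Int × Int)) : Int × (List (Int × Int)) :=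
  let r := pvALoop gold pred 0 (0, PySem.Dict.empty)
  (r.1, r.2.items)

-- ===== PORT B =====
-- 'buckets = {}; for i, ps in enumerate(pred): buckets.setdefault(ps, []).append(i)'
-- (setdefault+append ≡ buckets[ps] = buckets.get(ps, []) + [i], i.e. Dict.modify)
def pvBuckets (pred : List (Int × Int)) : PySem.Dict (Int × Int) (List Int) :=
  (PySem.List.enumerate pred 0).foldl
    (fun d p => d.modify p.2 [] (fun l => l ++ [p.1])) PySem.Dict.empty

-- 'for j, gs in enumerate(gold): for i in buckets.pop(gs, ()): mapped[i] = j'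
-- (the bucket indices i are pred positions, 0 ≤ i < len(pred), so 'mapped[i] = j' is List.set i.toNat)
def pvGoldLoop : List (Int × Int) → Int → List Int → PySem.Dict (Int × Int) (List Int) → List Int
  | [], _, mapped, _ => mapped
  | gs :: rest, j, mapped, b =>
      match b.pop? gs with
      | some (l, b') => pvGoldLoop rest (j + 1) (l.foldl (fun m i => m.set i.toNat j) mapped) b'
      | none => pvGoldLoop rest (j + 1) mapped b

def get_span_mapping_alt (pred : List (Int × Int)) (gold : List (Int × Int)) : Int × (List (Int × Int)) :=
  let mapped := pvGoldLoop gold 0 (List.replicate pred.length (-1)) (pvBuckets pred)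
  let tp : Int := (mapped.countP (fun v => v != -1) : Nat)
  let d := (PySem.List.enumerate mapped 0).foldl (fun d p => d.insert p.1 p.2) PySem.Dict.empty
  (tp, d.items)

-- ===== PRECONDITION & SPEC =====
def Spec_get_span_mapping (pred : List (Int × Int)) (gold : List (Int × Int)) (out : Int × (List (Int × Int))) : Prop := out = get_span_mapping_alt pred gold
instance (pred : List (Int × Int)) (gold : List (Int × Int)) (out : Int × (List (Int × Int))) : Decidable (Spec_get_span_mapping pred gold out) := by unfold Spec_get_span_mapping; infer_instance

-- ===== CLAIM (what is proved, stated in full; the proofs are below) =====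
def Claim_equal_get_span_mapping : Prop := ∀ (pred : List (Int × Int)) (gold : List (Int × Int)), Dom_get_span_mapping pred gold → Spec_get_span_mapping pred gold (get_span_mapping pred gold)

-- ===== LEMMAS AND PROOFS =====

-- ---- A side: values returned by the inner search are ≥ the starting index
theorem pvFindIdx_le {ps : Int × Int} : ∀ (gold : List (Int × Int)) (j v : Int),
    pvFindIdx ps gold j = some v → j ≤ v := by
  intro gold
  induction gold with
  | nil => intro j v h; simp [pvFindIdx] at h
  | cons g rest ih =>
    intro j v h
    simp only [pvFindIdx] at h
    split at h
    · injection h with h'; omega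
    · have := ih (j + 1) v h; omega

-- ---- A's outer loop, characterised: tp counts matches, items append in index order
theorem pvALoop_spec (gold : List (Int × Int)) :
    ∀ (pred : List (Int × Int)) (i tp : Int) (d : PySem.Dict Int Int),
    d.keys.Nodup → (∀ k ∈ d.keys, k < i) →
    pvALoop gold pred i (tp, d)
      = (tp + ((pred.map (fun ps => (pvFindIdx ps gold 0).getD (-1))).countP (fun v => v != -1) : Nat),
         PySem.Dict.mk (d.items ++ PySem.List.enumerate (pred.map (fun ps => (pvFindIdx ps gold 0).getD (-1))) i)) := by
  intro pred
  induction pred with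
  | nil =>
    intro i tp d _ _
    simp [pvALoop, PySem.List.enumerate_nil]
  | cons ps rest ih =>
    intro i tp d hnd hlt
    have hci : d.contains i = false := by
      rw [PySem.Dict.contains_eq_decide_mem_keys]
      simp only [decide_eq_false_iff_not]
      intro hmem; exact absurd (hlt i hmem) (lt_irrefl i)
    simp only [pvALoop]
    cases hf : pvFindIdx ps gold 0 with
    | some j =>
      have hji : 0 ≤ j := pvFindIdx_le gold 0 j hf
      have hcij : (d.insert i j).contains i = true := PySem.Dict.contains_insert_self d i j
      simp only [hcij, if_true]
      rw [ih (i + 1) (tp + 1) (d.insert i j)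
          (by rw [PySem.Dict.keys_insert_of_not_contains _ _ hci]
              exact List.Nodup.append hnd (List.nodup_singleton i)
                (by intro a ha hb; simp at hb; subst hb; exact absurd (hlt a ha) (lt_irrefl a)))
          (by rw [PySem.Dict.keys_insert_of_not_contains _ _ hci]
              intro k hk; simp at hk
              rcases hk with hk | hk
              · have := hlt k hk; omega
              · omega)]
      rw [PySem.Dict.items_insert_of_not_contains _ _ hci]
      simp only [List.map_cons, PySem.List.enumerate_cons, hf, List.countP_cons, Option.getD_some]
      have hj : ((j != -1) = true) := by simp; omega
      rw [Prod.mk.injEq]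
      refine ⟨by simp [hj]; omega, by rw [PySem.Dict.mk.injEq]; simp⟩
    | none =>
      simp only [hci, Bool.false_eq_true, if_false]
      rw [ih (i + 1) tp (d.insert i (-1))
          (by rw [PySem.Dict.keys_insert_of_not_contains _ _ hci]
              exact List.Nodup.append hnd (List.nodup_singleton i)
                (by intro a ha hb; simp at hb; subst hb; exact absurd (hlt a ha) (lt_irrefl a)))
          (by rw [PySem.Dict.keys_insert_of_not_contains _ _ hci]
              intro k hk; simp at hk
              rcases hk with hk | hk
              · have := hlt k hk; omega
              · omega)]
      rw [PySem.Dict.items_insert_of_not_contains _ _ hci]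
      simp only [List.map_cons, PySem.List.enumerate_cons, hf, List.countP_cons, Option.getD_none]
      rw [Prod.mk.injEq]
      refine ⟨by simp, by rw [PySem.Dict.mk.injEq]; simp⟩

-- ---- generic Dict fact: erase filters the key out, lookups elsewhere unchanged
theorem pv_get?_erase {κ ν : Type} [BEq κ] [LawfulBEq κ] [DecidableEq κ] (d : PySem.Dict κ ν) (k k' : κ) :
    (d.erase k).get? k' = if k' = k then none else d.get? k' := by
  obtain ⟨l⟩ := d
  induction l with
  | nil => simp [PySem.Dict.erase, PySem.Dict.get?]
  | cons p t ih =>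
    obtain ⟨pk, pv⟩ := p
    by_cases hpk : pk = k <;> by_cases hk' : k' = k <;> by_cases hpk' : pk = k' <;>
      simp_all [PySem.Dict.erase, PySem.Dict.get?_mk_cons]

-- l[k]! = l[k] for an in-range index
theorem pv_getElem! {α : Type} [Inhabited α] (l : List α) (k : Nat) (h : k < l.length) :
    l[k]! = l[k] := by
  simp [List.getElem!_eq_getElem?_getD, List.getElem?_eq_getElem h]

-- ---- the bucket of span s: pred positions holding s, in order
def pvL (pred : List (Int × Int)) (s : Int × Int) : List Int :=
  ((PySem.List.enumerate pred 0).filter (fun p => p.2 == s)).map (fun p => p.1)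

theorem pv_mem_L (pred : List (Int × Int)) (s : Int × Int) (i : Int) :
    i ∈ pvL pred s ↔ ∃ (k : Nat) (h : k < pred.length), i = (k : Int) ∧ pred[k] = s := by
  simp only [pvL, List.mem_map, List.mem_filter, PySem.List.mem_enumerate_iff]
  constructor
  · rintro ⟨p, ⟨⟨k, hk, rfl⟩, hs⟩, hi⟩
    exact ⟨k, hk, by simpa using hi.symm, by simpa using hs⟩
  · rintro ⟨k, hk, rfl, hs⟩
    exact ⟨((k : Int), pred[k]), ⟨⟨k, hk, by simp⟩, by simpa using hs⟩, rfl⟩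

theorem pvBuckets_getD (pred : List (Int × Int)) (s : Int × Int) :
    (pvBuckets pred).getD s [] = pvL pred s := by
  have hfold : pvBuckets pred
      = ((PySem.List.enumerate pred 0).map Prod.swap).foldl
          (fun d q => d.modify q.1 [] (fun l => l ++ [q.2])) PySem.Dict.empty := by
    rw [List.foldl_map]; rfl
  rw [hfold, PySem.Dict.getD_foldl_modify_append]
  simp [pvL, List.filter_map, List.map_map, Function.comp_def, Prod.swap]

theorem pvBuckets_get?_eq_some (pred : List (Int × Int)) (s : Int × Int) (l : List Int)
    (h : (pvBuckets pred).get? s = some l) : l = pvL pred s := by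
  have hg := pvBuckets_getD pred s
  rw [PySem.Dict.getD_eq_get?_getD, h] at hg
  simpa using hg

theorem pvBuckets_get?_of_ne_nil (pred : List (Int × Int)) (s : Int × Int)
    (h : pvL pred s ≠ []) : (pvBuckets pred).get? s = some (pvL pred s) := by
  have hg := pvBuckets_getD pred s
  rw [PySem.Dict.getD_eq_get?_getD] at hg
  cases he : (pvBuckets pred).get? s with
  | none => rw [he] at hg; simp at hg; exact absurd hg h
  | some l => rw [he] at hg; simp at hg; rw [hg]

-- ---- the stamping fold: sets exactly the positions listed, to j
theorem pv_foldl_set_length (j : Int) : ∀ (l : List Int) (m : List Int),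
    (l.foldl (fun m i => m.set i.toNat j) m).length = m.length := by
  intro l
  induction l with
  | nil => intro m; rfl
  | cons a t ih => intro m; simp only [List.foldl_cons]; rw [ih]; simp

theorem pv_foldl_set_get (j : Int) : ∀ (l : List Int) (m : List Int) (k : Nat),
    k < m.length → (∀ i ∈ l, 0 ≤ i) →
    (l.foldl (fun m i => m.set i.toNat j) m)[k]! = if (k : Int) ∈ l then j else m[k]! := by
  intro l
  induction l with
  | nil => intro m k _ _; simp
  | cons a t ih =>
    intro m k hk hpos
    have ha0 : 0 ≤ a := hpos a List.mem_cons_self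
    rw [List.foldl_cons, ih _ k (by simpa using hk) (fun i hi => hpos i (List.mem_cons_of_mem a hi))]
    by_cases hm : (k : Int) ∈ t
    · rw [if_pos hm, if_pos (List.mem_cons_of_mem a hm)]
    · rw [if_neg hm]
      by_cases hak : a = (k : Int)
      · have hto : a.toNat = k := by omega
        rw [if_pos (show (k : Int) ∈ a :: t by rw [← hak]; exact List.mem_cons_self),
            pv_getElem! _ _ (by simpa using hk)]
        simp [hto]
      · have hne : a.toNat ≠ k := by omega
        rw [if_neg (by
          simp only [List.mem_cons]
          rintro (h | h)
          · exact hak h.symm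
          · exact hm h)]
        rw [pv_getElem! _ _ (by simpa using hk), pv_getElem! _ _ hk]
        simp [hne]

-- ---- the gold-driven loop: length is preserved
theorem pvGoldLoop_length : ∀ (gold : List (Int × Int)) (j : Int) (mapped : List Int)
    (b : PySem.Dict (Int × Int) (List Int)),
    (pvGoldLoop gold j mapped b).length = mapped.length := by
  intro gold
  induction gold with
  | nil => intro j mapped b; rfl
  | cons gs rest ih =>
    intro j mapped b
    cases he : b.get? gs with
    | none => simp only [pvGoldLoop, PySem.Dict.pop?, he, Option.map_none]; exact ih _ _ _
    | some l =>
      simp only [pvGoldLoop, PySem.Dict.pop?, he, Option.map_some]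
      rw [ih, pv_foldl_set_length]

-- ---- a position no remaining bucket mentions is never written again
theorem pvGoldLoop_dead : ∀ (gold : List (Int × Int)) (j : Int) (mapped : List Int)
    (b : PySem.Dict (Int × Int) (List Int)) (k : Nat), k < mapped.length →
    (∀ s l, b.get? s = some l → ∀ i ∈ l, 0 ≤ i ∧ i ≠ (k : Int)) →
    (pvGoldLoop gold j mapped b)[k]! = mapped[k]! := by
  intro gold
  induction gold with
  | nil => intro j mapped b k _ _; rfl
  | cons gs rest ih =>
    intro j mapped b k hk hOK
    cases he : b.get? gs with
    | none =>
      simp only [pvGoldLoop, PySem.Dict.pop?, he, Option.map_none]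
      exact ih _ _ _ _ hk hOK
    | some l =>
      simp only [pvGoldLoop, PySem.Dict.pop?, he, Option.map_some]
      have hpos : ∀ i ∈ l, 0 ≤ i := fun i hi => (hOK gs l he i hi).1
      have hnot : (k : Int) ∉ l := fun hmem => (hOK gs l he _ hmem).2 rfl
      rw [ih _ _ _ _ (by rw [pv_foldl_set_length]; exact hk)
          (fun s l' hs i hi => hOK s l' (by
            rw [pv_get?_erase] at hs
            split at hs
            · exact absurd hs (by simp)
            · exact hs) i hi)]
      rw [pv_foldl_set_get _ _ _ _ hk hpos, if_neg hnot]

-- ---- main invariant: while pred[k]'s bucket is still alive, position k ends up at the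
--      first gold index matching pred[k] (from j on), or keeps its current value
theorem pvGoldLoop_live (pred : List (Int × Int)) : ∀ (gold : List (Int × Int)) (j : Int)
    (mapped : List Int) (b : PySem.Dict (Int × Int) (List Int)) (k : Nat) (hk : k < pred.length),
    mapped.length = pred.length →
    (∀ s, b.get? s = (pvBuckets pred).get? s ∨ b.get? s = none) →
    b.get? (pred[k]) = (pvBuckets pred).get? (pred[k]) →
    (pvGoldLoop gold j mapped b)[k]! = (pvFindIdx (pred[k]) gold j).getD mapped[k]! := by
  intro gold
  induction gold with
  | nil => intro j mapped b k hk _ _ _; simp [pvGoldLoop, pvFindIdx]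
  | cons gs rest ih =>
    intro j mapped b k hk hlen hINV halive
    have hkmem : (k : Int) ∈ pvL pred (pred[k]) := (pv_mem_L _ _ _).mpr ⟨k, hk, rfl, rfl⟩
    have hself : (pvBuckets pred).get? (pred[k]) = some (pvL pred (pred[k])) :=
      pvBuckets_get?_of_ne_nil _ _ (fun h => by rw [h] at hkmem; exact absurd hkmem (List.not_mem_nil))
    cases he : b.get? gs with
    | none =>
      have hne : pred[k] ≠ gs := by
        intro h; rw [← h, halive, hself] at he; simp at he
      simp only [pvGoldLoop, PySem.Dict.pop?, he, Option.map_none]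
      rw [ih _ _ _ k hk hlen hINV halive]
      simp only [pvFindIdx, if_neg hne]
    | some l =>
      have hl : l = pvL pred gs := by
        rcases hINV gs with h | h
        · exact pvBuckets_get?_eq_some _ _ _ (h.symm.trans he)
        · rw [h] at he; simp at he
      have hposl : ∀ i ∈ l, 0 ≤ i := by
        intro i hi
        rcases (pv_mem_L _ _ _).mp (hl ▸ hi) with ⟨k', _, rfl, _⟩
        exact Int.natCast_nonneg k'
      simp only [pvGoldLoop, PySem.Dict.pop?, he, Option.map_some]
      by_cases hg : pred[k] = gs
      · -- pred[k]'s bucket pops now: k is stamped with j and never touched again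
        have hmem : (k : Int) ∈ l := by rw [hl, ← hg]; exact hkmem
        rw [pvGoldLoop_dead _ _ _ _ _ (by rw [pv_foldl_set_length]; omega)
            (by
              intro s l' hs i hi
              rw [pv_get?_erase] at hs
              split at hs
              · exact absurd hs (by simp)
              · rename_i hsgs
                have hl' : l' = pvL pred s := by
                  rcases hINV s with h | h
                  · exact pvBuckets_get?_eq_some _ _ _ (h.symm.trans hs)
                  · rw [h] at hs; simp at hs
                rcases (pv_mem_L _ _ _).mp (hl' ▸ hi) with ⟨k', hk', rfl, hps⟩
                refine ⟨Int.natCast_nonneg k', ?_⟩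
                intro hkk
                have : k' = k := by omega
                subst this
                exact hsgs (by rw [← hps, hg]))]
        rw [pv_foldl_set_get _ _ _ _ (by omega) hposl, if_pos hmem]
        simp only [pvFindIdx, if_pos hg, Option.getD_some]
      · -- another bucket pops: k is untouched, its bucket stays alive
        have hnot : (k : Int) ∉ l := by
          intro hi
          rcases (pv_mem_L _ _ _).mp (hl ▸ hi) with ⟨k', _, hkk, hps⟩
          have : k' = k := by omega
          subst this
          exact hg (by rw [hps])
        have hstamp : (l.foldl (fun m i => m.set i.toNat j) mapped)[k]! = mapped[k]! := by
          rw [pv_foldl_set_get _ _ _ _ (by omega) hposl, if_neg hnot]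
        rw [ih _ _ _ k hk (by rw [pv_foldl_set_length]; exact hlen)
            (by
              intro s
              rw [pv_get?_erase]
              split
              · exact Or.inr rfl
              · exact hINV s)
            (by rw [pv_get?_erase, if_neg hg]; exact halive),
          hstamp]
        simp only [pvFindIdx, if_neg hg]

-- ---- B's mapped array equals A's per-position first-match list
theorem pvMapped_eq (pred gold : List (Int × Int)) :
    pvGoldLoop gold 0 (List.replicate pred.length (-1)) (pvBuckets pred)
      = pred.map (fun ps => (pvFindIdx ps gold 0).getD (-1)) := by
  apply List.ext_getElem
  · rw [pvGoldLoop_length]; simp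
  · intro k h1 h2
    have hk : k < pred.length := by simpa using h2
    rw [← pv_getElem! _ _ h1,
        pvGoldLoop_live pred gold 0 _ _ k hk (by simp) (fun s => Or.inl rfl) rfl,
        pv_getElem! _ _ (show k < (List.replicate pred.length (-1 : Int)).length by simpa using hk)]
    simp

-- ---- B's output-dict fold just lays the enumerated pairs out as items
theorem pvBOut_items (mapped : List Int) :
    ((PySem.List.enumerate mapped 0).foldl (fun d p => d.insert p.1 p.2) PySem.Dict.empty).items
      = PySem.List.enumerate mapped 0 := by
  have h := PySem.Dict.items_foldl_insert_fresh (l := PySem.List.enumerate mapped 0)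
    (k := Prod.fst) (v := Prod.snd) (d := PySem.Dict.empty)
    (by intro a _; exact PySem.Dict.contains_empty _)
    (by
      have hp : (PySem.List.enumerate mapped 0).Pairwise (fun p q => p.1 < q.1) :=
        PySem.List.pairwise_lt_enumerate mapped 0
      have : ((PySem.List.enumerate mapped 0).map Prod.fst).Pairwise (· < ·) := by
        rw [List.pairwise_map]; exact hp
      exact List.Pairwise.imp (fun h => ne_of_lt h) this)
  simpa using h

-- ===== VERDICT (by name: the statement is the Claim_ definition above) =====
theorem get_span_mapping_spec : Claim_equal_get_span_mapping := by
  intro pred gold _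
  unfold Spec_get_span_mapping
  simp only [get_span_mapping, get_span_mapping_alt]
  rw [pvALoop_spec gold pred 0 0 PySem.Dict.empty (by simp [PySem.Dict.empty]) (by simp [PySem.Dict.empty])]
  rw [pvMapped_eq, pvBOut_items]
  simp [PySem.Dict.empty]
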